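-- pv_equiv track=rewrite | github.com/BrianLi009/PhysicsCheck | orderly_generation/canonical.py | sol_to_lst
-- ===== SOURCE A (Python) =====
-- def sol_to_lst(solution):
--     """given string of solution, return in a list"""
--     lst = []
--     g = solution.split()
--     if 'a' in g:
--         g.remove('a')
--     if '0' in g:
--         g.remove('0')
--     for variable in g:
--         lst.append(int(variable))
--     return lst
-- ===== SOURCE B (Python) =====
-- def sol_to_lst(solution):
--     """given string of solution, return in a list"""
--     out = []
--     skipped_a = False
--     skipped_0 = False
--     for tok in solution.split():
--         if tok == 'a' and not skipped_a:
--             skipped_a = True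
--         elif tok == '0' and not skipped_0:
--             skipped_0 = True
--         else:
--             out.append(int(tok))
--     return out
-- ===== Notes on version B (the rewrite author's own statement) =====
-- stated objective: simpler
-- what changed: Replaces the two membership-test + remove() scans followed by a separate conversion loop with a single pass over the tokens that drops the first 'a' and the first '0' via two booleans while converting.
import Mathlib
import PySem

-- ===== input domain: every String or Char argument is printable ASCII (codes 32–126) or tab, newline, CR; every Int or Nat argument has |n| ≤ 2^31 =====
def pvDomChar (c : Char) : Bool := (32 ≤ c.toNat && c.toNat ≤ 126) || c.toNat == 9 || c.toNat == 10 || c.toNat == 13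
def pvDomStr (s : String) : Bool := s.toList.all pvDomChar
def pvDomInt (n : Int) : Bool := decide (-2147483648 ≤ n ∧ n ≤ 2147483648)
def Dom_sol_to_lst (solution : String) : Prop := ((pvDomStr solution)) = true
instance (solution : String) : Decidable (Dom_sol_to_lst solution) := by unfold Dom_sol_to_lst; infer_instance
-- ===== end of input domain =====

-- B fuses A's two membership-test + remove() scans and separate conversion loop into one
-- stateful pass with two skip flags (objective: simpler).


-- ===== PORT A =====
def sol_to_lst (solution : String) : List Int :=
  let lst : List Int := []
  let g := PySem.Str.split₀ solution
  let g := if "a" ∈ g then (PySem.List.remove? g "a").getD g else g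
  let g := if "0" ∈ g then (PySem.List.remove? g "0").getD g else g
  -- int(variable): (ofStr? _).getD 0 is total; Pre_ guarantees ofStr? = some here
  g.foldl (fun lst v_ => lst ++ [(PySem.Int.ofStr? v_).getD 0]) lst

-- ===== PORT B =====
-- one pass; state = (skipped_a, skipped_0, out)
def sol_to_lst_alt (solution : String) : List Int :=
  ((PySem.Str.split₀ solution).foldl
    (fun (st : Bool × Bool × List Int) tok =>
      if tok = "a" ∧ st.1 = false then (true, st.2.1, st.2.2)
      else if tok = "0" ∧ st.2.1 = false then (st.1, true, st.2.2)
      else (st.1, st.2.1, st.2.2 ++ [(PySem.Int.ofStr? tok).getD 0]))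
    (false, false, [])).2.2

-- ===== PRECONDITION & SPEC =====
-- helper for Pre_: remove the first occurrence of v, if present (what list.remove does)
def pvRmv (v : String) (g : List String) : List String :=
  if v ∈ g then (PySem.List.remove? g v).getD g else g

-- Pre_: every token surviving the removal of the first 'a' and the first '0'
-- parses as a Python int (otherwise A raises ValueError).
def Pre_sol_to_lst (solution : String) : Prop :=
  ∀ t ∈ pvRmv "0" (pvRmv "a" (PySem.Str.split₀ solution)), (PySem.Int.ofStr? t).isSome = true
instance (solution : String) : Decidable (Pre_sol_to_lst solution) := by
  unfold Pre_sol_to_lst; infer_instance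

def pvWitness_sol_to_lst : String := "1 a 0 -2"

def Spec_sol_to_lst (solution : String) (out : List Int) : Prop := out = sol_to_lst_alt solution
instance (solution : String) (out : List Int) : Decidable (Spec_sol_to_lst solution out) := by unfold Spec_sol_to_lst; infer_instance

-- ===== CLAIM (what is proved, stated in full; the proofs are below) =====
def Claim_equal_sol_to_lst : Prop := ∀ (solution : String), Dom_sol_to_lst solution → Pre_sol_to_lst solution → Spec_sol_to_lst solution (sol_to_lst solution)

-- ===== LEMMAS AND PROOFS =====

def pvToInt (t : String) : Int := (PySem.Int.ofStr? t).getD 0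

-- what B's loop keeps, as a structural recursion on the token list
def pvKeep (sa s0 : Bool) : List String → List String
  | [] => []
  | t :: ts =>
    if t = "a" ∧ sa = false then pvKeep true s0 ts
    else if t = "0" ∧ s0 = false then pvKeep sa true ts
    else t :: pvKeep sa s0 ts

theorem pvRmv_cons (v t : String) (ts : List String) :
    pvRmv v (t :: ts) = if t = v then ts else t :: pvRmv v ts := by
  by_cases h : t = v
  · subst h; simp [pvRmv]
  · by_cases hv : v ∈ ts
    · simp [pvRmv, h, hv, PySem.List.remove?_cons_of_ne ts h,
        PySem.List.remove?_eq_some_erase ts v hv]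
    · simp [pvRmv, h, hv, Ne.symm h]

theorem pvRmv_nil (v : String) : pvRmv v [] = [] := by simp [pvRmv]

theorem pvKeep_tt (g : List String) : pvKeep true true g = g := by
  induction g with
  | nil => rfl
  | cons t ts ih => simp [pvKeep, ih]

theorem pvKeep_tf (g : List String) : pvKeep true false g = pvRmv "0" g := by
  induction g with
  | nil => simp [pvKeep, pvRmv_nil]
  | cons t ts ih =>
    rw [pvRmv_cons]
    by_cases h : t = "0"
    · simp [pvKeep, h, pvKeep_tt]
    · simp [pvKeep, h, ih]

theorem pvKeep_ft (g : List String) : pvKeep false true g = pvRmv "a" g := by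
  induction g with
  | nil => simp [pvKeep, pvRmv_nil]
  | cons t ts ih =>
    rw [pvRmv_cons]
    by_cases h : t = "a"
    · simp [pvKeep, h, pvKeep_tt]
    · simp [pvKeep, h, ih]

theorem pvRmv_comm (g : List String) : pvRmv "0" (pvRmv "a" g) = pvRmv "a" (pvRmv "0" g) := by
  induction g with
  | nil => simp [pvRmv_nil]
  | cons t ts ih =>
    by_cases ha : t = "a"
    · subst ha
      rw [pvRmv_cons, if_pos rfl, pvRmv_cons, if_neg (by decide), pvRmv_cons, if_pos rfl]
    · by_cases h0 : t = "0"
      · subst h0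
        rw [pvRmv_cons, if_neg (by decide), pvRmv_cons, if_pos rfl, pvRmv_cons, if_pos rfl]
      · rw [pvRmv_cons, if_neg ha, pvRmv_cons, if_neg h0, pvRmv_cons, if_neg h0,
          pvRmv_cons, if_neg ha, ih]

theorem pvKeep_ff (g : List String) : pvKeep false false g = pvRmv "0" (pvRmv "a" g) := by
  induction g with
  | nil => simp [pvKeep, pvRmv_nil]
  | cons t ts ih =>
    by_cases ha : t = "a"
    · subst ha
      rw [pvRmv_cons, if_pos rfl]
      simpa [pvKeep] using pvKeep_tf ts
    · by_cases h0 : t = "0"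
      · subst h0
        rw [pvRmv_comm, pvRmv_cons, if_pos rfl]
        simpa [pvKeep] using pvKeep_ft ts
      · rw [pvRmv_cons, if_neg ha, pvRmv_cons, if_neg h0]
        simp [pvKeep, ha, h0, ih]

-- B's fold, characterised
theorem pvFoldB (g : List String) (sa s0 : Bool) (out : List Int) :
    (g.foldl
      (fun (st : Bool × Bool × List Int) tok =>
        if tok = "a" ∧ st.1 = false then (true, st.2.1, st.2.2)
        else if tok = "0" ∧ st.2.1 = false then (st.1, true, st.2.2)
        else (st.1, st.2.1, st.2.2 ++ [(PySem.Int.ofStr? tok).getD 0]))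
      (sa, s0, out)).2.2 = out ++ (pvKeep sa s0 g).map pvToInt := by
  induction g generalizing sa s0 out with
  | nil => simp [pvKeep]
  | cons t ts ih =>
    by_cases ha : t = "a" ∧ sa = false
    · simp [pvKeep, ha, List.foldl_cons, ih]
    · by_cases h0 : t = "0" ∧ s0 = false
      · simp [pvKeep, h0, List.foldl_cons, ih]
      · simp [pvKeep, ha, h0, List.foldl_cons, ih, pvToInt]

-- A's fold is a map
theorem pvFoldA (g : List String) :
    g.foldl (fun lst v_ => lst ++ [(PySem.Int.ofStr? v_).getD 0]) ([] : List Int)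
      = g.map pvToInt := by
  simpa [pvToInt] using PySem.List.foldl_append_singleton_eq_map pvToInt g []

-- ===== VERDICT (by name: the statement is the Claim_ definition above) =====
theorem sol_to_lst_spec : Claim_equal_sol_to_lst := by
  intro solution _ _
  show sol_to_lst solution = sol_to_lst_alt solution
  unfold sol_to_lst sol_to_lst_alt
  rw [pvFoldB, pvKeep_ff, pvFoldA]
  rfl
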